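-- pv_equiv track=rewrite | github.com/nju-websoft/CR-TKGQA | baselines/SF-TQA/mark/postprocess_dataset.py | split_by_signal1
-- ===== SOURCE A (Python) =====
-- def split_by_signal1(labels):
--     labels_group = list()
--     for label in labels:
--         if label['label'] == 'S1':
--             if len(labels_group) == 0 or labels_group[-1][0]['label'] != 'S1':
--                 labels_group.append([label])
--             else:
--                 labels_group[-1].append(label)
--         else:
--             if len(labels_group) == 0:
--                 labels_group.append([label])
--             else:
--                 if labels_group[-1][0]['label'] == 'S1':
--                     labels_group.append([label])
--                 else:
--                     labels_group[-1].append(label)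
--     return labels_group
-- ===== SOURCE B (Python) =====
-- def split_by_signal1(labels):
--     groups = []
--     i, n = 0, len(labels)
--     while i < n:
--         k = labels[i]['label'] == 'S1'
--         j = i + 1
--         while j < n and (labels[j]['label'] == 'S1') == k:
--             j += 1
--         groups.append(labels[i:j])
--         i = j
--     return groups
-- ===== Notes on version B (the rewrite author's own statement) =====
-- stated objective: alternative
-- what changed: B scans forward to find each run's boundary index and slices out whole runs at once, instead of A's per-element decision tree that re-inspects the first element of the last accumulated group.
import Mathlib
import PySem

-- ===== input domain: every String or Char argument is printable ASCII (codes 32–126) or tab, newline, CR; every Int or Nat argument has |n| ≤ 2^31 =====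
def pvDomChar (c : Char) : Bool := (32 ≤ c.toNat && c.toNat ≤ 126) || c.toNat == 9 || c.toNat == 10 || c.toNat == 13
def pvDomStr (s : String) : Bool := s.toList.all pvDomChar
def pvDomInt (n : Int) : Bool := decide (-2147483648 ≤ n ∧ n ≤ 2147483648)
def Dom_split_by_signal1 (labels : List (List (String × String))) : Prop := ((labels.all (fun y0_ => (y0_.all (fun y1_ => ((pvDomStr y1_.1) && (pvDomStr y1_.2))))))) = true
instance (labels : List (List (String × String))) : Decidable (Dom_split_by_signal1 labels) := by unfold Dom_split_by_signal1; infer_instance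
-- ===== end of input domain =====

-- B finds each run's boundary by scanning forward and slices whole runs out at once,
-- instead of A's per-element decision tree re-inspecting the last accumulated group (alternative decomposition, same cost).


-- ===== PORT A =====
-- label['label'] (first-match association-list lookup); == 'S1' compared on the Option
def pvKey (l : List (String × String)) : Option String := List.lookup "label" l

-- one iteration of A's loop: the full branch tree over labels_group
def pvStepA (groups : List (List (List (String × String)))) (label : List (String × String)) :
    List (List (List (String × String))) :=
  if pvKey label == some "S1" then
    if groups.length == 0 || !(pvKey ((groups.getLastD []).headD []) == some "S1") then
      groups ++ [[label]]
    else
      groups.dropLast ++ [(groups.getLastD []) ++ [label]]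
  else
    if groups.length == 0 then
      groups ++ [[label]]
    else
      if pvKey ((groups.getLastD []).headD []) == some "S1" then
        groups ++ [[label]]
      else
        groups.dropLast ++ [(groups.getLastD []) ++ [label]]

def split_by_signal1 (labels : List (List (String × String))) : List (List (List (String × String))) :=
  labels.foldl pvStepA []

-- ===== PORT B =====
-- boolean run key (labels[i]['label'] == 'S1')
def pvIsS1 (l : List (String × String)) : Bool := pvKey l == some "S1"

-- B: find the run boundary (the inner while = takeWhile/dropWhile split), slice the run, recurse on the rest
def split_by_signal1_alt (labels : List (List (String × String))) : List (List (List (String × String))) :=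
  match labels with
  | [] => []
  | x :: xs =>
    (x :: xs.takeWhile (fun y => pvIsS1 y == pvIsS1 x)) ::
      split_by_signal1_alt (xs.dropWhile (fun y => pvIsS1 y == pvIsS1 x))
termination_by labels.length
decreasing_by
  simp only [List.length_cons]
  exact Nat.lt_succ_of_le (List.length_dropWhile_le _ _)

-- ===== PRECONDITION & SPEC =====
-- Pre_ excludes labels missing the 'label' key, on which Python A raises KeyError
def Pre_split_by_signal1 (labels : List (List (String × String))) : Prop :=
  ∀ l ∈ labels, (List.lookup "label" l).isSome = true
instance (labels : List (List (String × String))) : Decidable (Pre_split_by_signal1 labels) := by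
  unfold Pre_split_by_signal1; infer_instance

def pvWitness_split_by_signal1 : (List (List (String × String))) :=
  [[("label", "S1")], [("label", "O")], [("label", "O")], [("label", "S1")], [("label", "S1")]]

def Spec_split_by_signal1 (labels : List (List (String × String))) (out : List (List (List (String × String)))) : Prop := out = split_by_signal1_alt labels
instance (labels : List (List (String × String))) (out : List (List (List (String × String)))) : Decidable (Spec_split_by_signal1 labels out) := by unfold Spec_split_by_signal1; infer_instance

-- ===== CLAIM (what is proved, stated in full; the proofs are below) =====
def Claim_equal_split_by_signal1 : Prop := ∀ (labels : List (List (String × String))), Dom_split_by_signal1 labels → Pre_split_by_signal1 labels → Spec_split_by_signal1 labels (split_by_signal1 labels)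

-- ===== LEMMAS AND PROOFS =====

-- One A-step on a nonempty accumulator: append to the last group iff the run key matches its first element
lemma pvStepA_concat (gs : List (List (List (String × String)))) (f : List (String × String))
    (t : List (List (String × String))) (x : List (String × String)) :
    pvStepA (gs ++ [f :: t]) x =
      if pvIsS1 x == pvIsS1 f then gs ++ [f :: (t ++ [x])]
      else (gs ++ [f :: t]) ++ [[x]] := by
  rcases Bool.eq_false_or_eq_true (pvKey x == some "S1") with h1 | h1 <;>
    rcases Bool.eq_false_or_eq_true (pvKey f == some "S1") with h2 | h2 <;>
      simp [pvStepA, pvIsS1, h1, h2]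

-- Invariant of A's fold: the remaining input extends the last open run while the key matches,
-- then the rest is grouped exactly as B groups it
lemma pvFoldA_runs (xs : List (List (String × String))) :
    ∀ (gs : List (List (List (String × String)))) (f : List (String × String))
      (t : List (List (String × String))),
      List.foldl pvStepA (gs ++ [f :: t]) xs =
        gs ++ (f :: (t ++ xs.takeWhile (fun y => pvIsS1 y == pvIsS1 f))) ::
          split_by_signal1_alt (xs.dropWhile (fun y => pvIsS1 y == pvIsS1 f)) := by
  induction xs with
  | nil => intro gs f t; simp [split_by_signal1_alt]
  | cons x xs ih =>
    intro gs f t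
    simp only [List.foldl_cons, pvStepA_concat]
    by_cases hk : pvIsS1 x = pvIsS1 f
    · simp only [hk, beq_self_eq_true, if_true]
      rw [ih gs f (t ++ [x])]
      simp [hk]
    · have hk' : (pvIsS1 x == pvIsS1 f) = false := by simp [hk]
      simp only [hk', Bool.false_eq_true, if_false]
      have := ih (gs ++ [f :: t]) x []
      simp only [List.nil_append] at this
      rw [this]
      simp [hk', split_by_signal1_alt]

-- ===== VERDICT (by name: the statement is the Claim_ definition above) =====
theorem split_by_signal1_spec : Claim_equal_split_by_signal1 := by
  intro labels _ _
  unfold Spec_split_by_signal1 split_by_signal1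
  cases labels with
  | nil => simp [split_by_signal1_alt]
  | cons x xs =>
    have := pvFoldA_runs xs [] x []
    simp only [List.nil_append] at this
    simp [List.foldl_cons, pvStepA, this, split_by_signal1_alt]
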